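-- pv_equiv track=rewrite | github.com/szymonW/python_flask_restapi | lib/helpers.py | create_games
-- ===== SOURCE A (Python) =====
-- def create_games(names):
--     temp_names = names.copy()
--     temp_games = {}
--     games = {}
--     iter_games = 1
--     for i in names:
--         temp_names.pop(0)
--         for j in temp_names:
--             temp_games[iter_games] = {"p1": i, "p2": j, "winner": ""}
--             iter_games += 1
--
--     iter_games = 1
--     pro_iter_games = 1
--     rev_iter_games = 0
--     for mix_games in range(len(temp_games.keys())):
--         if (mix_games+1) % 2:
--             games[mix_games+1] = temp_games[pro_iter_games]
--             pro_iter_games += 1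
--         else:
--             games[mix_games+1] = temp_games[len(temp_games.keys())-rev_iter_games]
--             rev_iter_games += 1
--         iter_games += 1
--
--     return games
-- ===== SOURCE B (Python) =====
-- def create_games(names):
--     # Scatter: each forward pair (t-th in lexicographic order, t = 0,1,...) is
--     # written directly into its final slot, computed in closed form:
--     # pairs taken from the front land at odd keys 2t+1, the rest at even keys
--     # 2(m-t).  One pass, no intermediate keyed dict, no parity/counter loop.
--     m = len(names) * (len(names) - 1) // 2
--     slots = [None] * m
--     t = 0
--     for i, a in enumerate(names):
--         for b in names[i + 1:]:
--             k = 2 * t + 1 if 2 * t + 1 <= m else 2 * (m - t)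
--             slots[k - 1] = {"p1": a, "p2": b, "winner": ""}
--             t += 1
--     return dict(enumerate(slots, 1))
-- ===== Notes on version B (the rewrite author's own statement) =====
-- stated objective: alternative
-- what changed: B computes each forward pair's final key in closed form (front pairs at odd keys 2t+1, the rest at even keys 2(m-t)) and scatters the pairs into a preallocated slot array in a single pass, instead of A's two staged passes (keyed intermediate dict, then a parity loop with separate forward and backward counters).
import Mathlib
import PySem

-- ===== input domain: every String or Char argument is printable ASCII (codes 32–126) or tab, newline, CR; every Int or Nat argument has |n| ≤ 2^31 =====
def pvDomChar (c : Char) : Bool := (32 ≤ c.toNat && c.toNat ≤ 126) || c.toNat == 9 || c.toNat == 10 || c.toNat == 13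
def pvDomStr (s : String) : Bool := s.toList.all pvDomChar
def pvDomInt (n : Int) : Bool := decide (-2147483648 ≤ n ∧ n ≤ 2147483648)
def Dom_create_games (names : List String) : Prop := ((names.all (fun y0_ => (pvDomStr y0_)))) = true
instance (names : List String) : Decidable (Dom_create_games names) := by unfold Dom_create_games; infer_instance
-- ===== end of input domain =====

-- B computes each forward pair's final key in closed form (front pairs at odd keys 2t+1, the
-- rest at even keys 2(m-t)) and scatters the pairs into a preallocated slot list in a single
-- pass, instead of A's two staged passes (keyed intermediate dict, then a parity loop with
-- separate forward/backward counters); objective: alternative.  Equivalence of the returned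
-- dict (as an insertion-ordered association list) is proved for all inputs.

-- the inner-dict literal {"p1": i, "p2": j, "winner": ""} (shared record constructor of both programs)
def pvGame (i j : String) : List (String × String) := [("p1", i), ("p2", j), ("winner", "")]

-- ===== PORT A =====
-- temp_names.pop(0) is ported as .tail: A executes it once per element of names, so the list is
-- never empty when popped (Python never raises there); likewise temp_games[k] is ported as
-- getD _ [] — every key A looks up (1..n and n-rev) is present, so the KeyError branch is
-- unreachable and the default is never used.
def create_games (names : List String) : List (Int × List (String × String)) :=
  let st := names.foldl
    (fun (st : List String × PySem.Dict Int (List (String × String)) × Int) i =>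
      let temp := st.1.tail
      let inner := temp.foldl
        (fun (p : PySem.Dict Int (List (String × String)) × Int) j =>
          (p.1.insert p.2 (pvGame i j), p.2 + 1)) (st.2.1, st.2.2)
      (temp, inner.1, inner.2))
    (names, PySem.Dict.empty, 1)
  let temp_games := st.2.1
  let n : Int := (temp_games.keys.length : Int)
  let st2 := (PySem.List.pyRange 0 n 1).foldl
    (fun (q : PySem.Dict Int (List (String × String)) × Int × Int) mix =>
      if PySem.Int.mod (mix + 1) 2 ≠ 0 then
        (q.1.insert (mix + 1) (temp_games.getD q.2.1 []), q.2.1 + 1, q.2.2)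
      else
        (q.1.insert (mix + 1) (temp_games.getD (n - q.2.2) []), q.2.1, q.2.2 + 1))
    (PySem.Dict.empty, 1, 0)
  st2.1.items

-- ===== PORT B =====
-- slots = [None] * m: every slot is written exactly once (the key map t ↦ k is a bijection onto
-- 1..m), so None never survives to the result; the None placeholder is ported as [].
-- slots[k-1] = … is PySem.List.pySetD (k-1 is always in range, Python never raises there).
def create_games_alt (names : List String) : List (Int × List (String × String)) :=
  let m : Int := PySem.Int.floordiv ((names.length : Int) * ((names.length : Int) - 1)) 2
  let st := (PySem.List.enumerate names 0).foldl
    (fun (st : List (List (String × String)) × Int) p =>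
      (PySem.List.slice names (some (p.1 + 1)) none).foldl
        (fun (st : List (List (String × String)) × Int) b =>
          (PySem.List.pySetD st.1
            ((if 2 * st.2 + 1 ≤ m then 2 * st.2 + 1 else 2 * (m - st.2)) - 1)
            (pvGame p.2 b), st.2 + 1)) st)
    (List.replicate m.toNat [], 0)
  PySem.List.enumerate st.1 1

-- ===== PRECONDITION & SPEC =====
def Spec_create_games (names : List String) (out : List (Int × List (String × String))) : Prop := out = create_games_alt names
instance (names : List String) (out : List (Int × List (String × String))) : Decidable (Spec_create_games names out) := by unfold Spec_create_games; infer_instance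

-- ===== CLAIM (what is proved, stated in full; the proofs are below) =====
def Claim_equal_create_games : Prop := ∀ (names : List String), Dom_create_games names → Spec_create_games names (create_games names)

-- ===== LEMMAS AND PROOFS =====

-- the list of forward pairs of A's first phase, structurally
def pairsR : List String → List (List (String × String))
  | [] => []
  | a :: t => t.map (pvGame a) ++ pairsR t

-- A's first-phase insertions: consecutive keys starting at c
def pushAll (d : PySem.Dict Int (List (String × String))) (c : Int) :
    List (List (String × String)) → PySem.Dict Int (List (String × String)) × Int
  | [] => (d, c)
  | g :: gs => pushAll (d.insert c g) (c + 1) gs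

-- consecutive keying of a list, as an items list
def pvKeyed (c : Int) : List (List (String × String)) → List (Int × List (String × String))
  | [] => []
  | g :: gs => (c, g) :: pvKeyed (c + 1) gs

-- the front/back interleave, recursively (common description of both outputs)
def pvDrain : List (List (String × String)) → Int → List (Int × List (String × String))
  | [], _ => []
  | x :: rest, key =>
    if h : rest = [] then [(key, x)]
    else (key, x) :: (key + 1, rest.getLast h) :: pvDrain rest.dropLast (key + 2)
  termination_by l _ => l.length
  decreasing_by simp

-- source index of output position q (0-based) in the forward pair list of length m
def srcIdx (m q : Nat) : Nat := if q % 2 = 0 then q / 2 else m - (q + 1) / 2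

-- destination key of forward pair t in a list of m pairs (B's closed form, in Nat)
def natKey (m t : Nat) : Nat := if 2 * t + 1 ≤ m then 2 * t + 1 else 2 * (m - t)

theorem mem_pvKeyed (ps : List (List (String × String))) :
    ∀ (c : Int) (t : Nat), t < ps.length → ((c + t : Int), ps.getD t []) ∈ pvKeyed c ps := by
  induction ps with
  | nil => intro c t ht; simp at ht
  | cons g gs ih =>
    intro c t ht
    cases t with
    | zero => simp [pvKeyed]
    | succ t' =>
      have h := ih (c+1) t' (by simpa using ht)
      simp only [pvKeyed, List.getD_cons_succ, List.mem_cons]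
      right
      have he : c + ((t' : Int) + 1) = (c + 1) + (t' : Int) := by ring
      push_cast
      rw [he]
      exact h

theorem pushAll_spec (ps : List (List (String × String))) :
    ∀ (d : PySem.Dict Int (List (String × String))) (c : Int),
    d.keys.Nodup → (∀ k ∈ d.keys, k < c) →
    (pushAll d c ps).1.items = d.items ++ pvKeyed c ps ∧
    (pushAll d c ps).2 = c + ps.length ∧
    (pushAll d c ps).1.keys.Nodup ∧
    (∀ k ∈ (pushAll d c ps).1.keys, k < c + ps.length) := by
  induction ps with
  | nil => intro d c h1 h2; simpa [pushAll, pvKeyed] using ⟨h1, h2⟩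
  | cons g gs ih =>
    intro d c h1 h2
    have hnc : d.contains c = false := by
      by_contra h
      have hc : d.contains c = true := by simpa using h
      have := h2 c ((PySem.Dict.contains_iff_mem_keys d c).1 hc)
      omega
    have hkeys : (d.insert c g).keys = d.keys ++ [c] := PySem.Dict.keys_insert_of_not_contains d g hnc
    have hitems : (d.insert c g).items = d.items ++ [(c, g)] := PySem.Dict.items_insert_of_not_contains d g hnc
    have hnd' : (d.insert c g).keys.Nodup := by
      rw [hkeys, List.nodup_append]
      refine ⟨h1, List.nodup_singleton c, ?_⟩
      intro a ha b hb
      rw [List.mem_singleton] at hb; subst hb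
      have := h2 a ha
      intro heq; omega
    have hb' : ∀ k ∈ (d.insert c g).keys, k < c + 1 := by
      intro k hk; rw [hkeys] at hk; simp at hk
      rcases hk with h | h
      · have := h2 k h; omega
      · omega
    obtain ⟨i1, i2, i3, i4⟩ := ih (d.insert c g) (c+1) hnd' hb'
    refine ⟨?_, ?_, i3, ?_⟩
    · simp [pushAll, i1, hitems, pvKeyed]
    · simp [pushAll, i2]; ring
    · intro k hk
      have := i4 k (by simpa [pushAll] using hk)
      simp only [List.length_cons] at *
      push_cast at this ⊢; omega

theorem pvKeyed_length (ps : List (List (String × String))) :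
    ∀ c, (pvKeyed c ps).length = ps.length := by
  induction ps with
  | nil => intro c; simp [pvKeyed]
  | cons g gs ih => intro c; simp [pvKeyed, ih]

theorem getD_of_items (tg : PySem.Dict Int (List (String × String)))
    (pairs : List (List (String × String)))
    (htg : tg.items = pvKeyed 1 pairs) (hnd : tg.keys.Nodup)
    (t : Nat) (ht : t < pairs.length) :
    tg.getD ((t : Int) + 1) [] = pairs.getD t [] := by
  have hm : ((1 + t : Int), pairs.getD t []) ∈ pvKeyed 1 pairs := mem_pvKeyed pairs 1 t ht
  rw [← htg] at hm
  rw [show ((t : Int) + 1) = (1 + t : Int) by ring]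
  exact PySem.Dict.getD_of_mem_items tg hm hnd []

theorem phase1 (l : List String) : ∀ (d : PySem.Dict Int (List (String × String))) (c : Int),
    l.foldl
      (fun (st : List String × PySem.Dict Int (List (String × String)) × Int) i =>
        let temp := st.1.tail
        let inner := temp.foldl
          (fun (p : PySem.Dict Int (List (String × String)) × Int) j =>
            (p.1.insert p.2 (pvGame i j), p.2 + 1)) (st.2.1, st.2.2)
        (temp, inner.1, inner.2))
      (l, d, c)
    = ([], (pushAll d c (pairsR l)).1, (pushAll d c (pairsR l)).2) := by
  have inner_eq : ∀ (temp : List String) (i : String) (d : PySem.Dict Int (List (String × String))) (c : Int),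
      temp.foldl (fun (p : PySem.Dict Int (List (String × String)) × Int) j =>
        (p.1.insert p.2 (pvGame i j), p.2 + 1)) (d, c)
      = pushAll d c (temp.map (pvGame i)) := by
    intro temp i
    induction temp with
    | nil => intro d c; simp [pushAll]
    | cons x xs ih => intro d c; simp [pushAll, ih]
  have pushAll_append : ∀ (xs ys : List (List (String × String))) d c,
      pushAll d c (xs ++ ys) = pushAll (pushAll d c xs).1 (pushAll d c xs).2 ys := by
    intro xs
    induction xs with
    | nil => intro ys d c; simp [pushAll]
    | cons x t ih => intro ys d c; simp [pushAll, ih]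
  induction l with
  | nil => intro d c; simp [pairsR, pushAll]
  | cons a t ih =>
    intro d c
    simp only [List.foldl_cons, List.tail_cons]
    rw [inner_eq]
    have := ih (pushAll d c (t.map (pvGame a))).1 (pushAll d c (t.map (pvGame a))).2
    simp only [pairsR, pushAll_append]
    exact this

theorem win_cons {α : Type} (l : List α) (d : α) (fro bak : Nat)
    (h1 : fro < bak) (h2 : bak ≤ l.length) :
    (l.take bak).drop fro = l.getD fro d :: (l.take bak).drop (fro + 1) := by
  have hlt : fro < (l.take bak).length := by simp; omega
  rw [List.drop_eq_getElem_cons hlt]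
  congr 1
  rw [List.getElem_take, List.getD_eq_getElem l d (by omega)]

theorem win_last {α : Type} (l : List α) (d : α) (fro bak : Nat)
    (h1 : fro + 1 < bak) (h2 : bak ≤ l.length)
    (h : (l.take bak).drop (fro + 1) ≠ []) :
    ((l.take bak).drop (fro + 1)).getLast h = l.getD (bak - 1) d := by
  rw [List.getLast_eq_getElem]
  have hlen : ((l.take bak).drop (fro + 1)).length = bak - fro - 1 := by simp; omega
  rw [List.getD_eq_getElem l d (by omega)]
  simp only [List.getElem_drop, List.getElem_take]
  congr 1
  omega

theorem win_dropLast {α : Type} (l : List α) (fro bak : Nat) (h2 : bak ≤ l.length) :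
    ((l.take bak).drop (fro + 1)).dropLast = (l.take (bak - 1)).drop (fro + 1) := by
  apply List.ext_getElem
  · simp; omega
  · intro i hi1 hi2
    simp only [List.getElem_dropLast, List.getElem_drop, List.getElem_take]

theorem phase2 (tg : PySem.Dict Int (List (String × String)))
    (pairs : List (List (String × String)))
    (htg : tg.items = pvKeyed 1 pairs) (hnd : tg.keys.Nodup) :
    ∀ (k fro : Nat) (g : PySem.Dict Int (List (String × String))),
    2 * fro + k = pairs.length →
    g.keys.Nodup → (∀ key ∈ g.keys, key < (2 * fro : Int) + 1) →
    ((PySem.List.pyRange ((2 * fro : Nat) : Int) ((pairs.length : Nat) : Int) 1).foldl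
      (fun (q : PySem.Dict Int (List (String × String)) × Int × Int) mix =>
        if PySem.Int.mod (mix + 1) 2 ≠ 0 then
          (q.1.insert (mix + 1) (tg.getD q.2.1 []), q.2.1 + 1, q.2.2)
        else
          (q.1.insert (mix + 1) (tg.getD (((pairs.length : Nat) : Int) - q.2.2) []), q.2.1, q.2.2 + 1))
      (g, (fro : Int) + 1, (fro : Int))).1.items
    = g.items ++ pvDrain ((pairs.take (pairs.length - fro)).drop fro) (((2 * fro : Nat) : Int) + 1) := by
  intro k
  induction k using Nat.strong_induction_on with
  | _ k ihk =>
    intro fro g hk hgnd hgb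
    set m := pairs.length with hm
    match k, hk with
    | 0, hk =>
      rw [PySem.List.pyRange_one_eq_nil (by push_cast; omega)]
      have hwin : (pairs.take (m - fro)).drop fro = [] := by
        apply List.drop_eq_nil_of_le
        simp; omega
      simp [hwin, pvDrain]
    | 1, hk =>
      have hcons : PySem.List.pyRange ((2 * fro : Nat) : Int) (m : Int) 1
          = [((2 * fro : Nat) : Int)] := by
        rw [PySem.List.pyRange_one_cons (by push_cast; omega),
            PySem.List.pyRange_one_eq_nil (by push_cast; omega)]
      rw [hcons]
      simp only [List.foldl_cons, List.foldl_nil]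
      rw [if_pos (by rw [PySem.Int.mod_eq_emod_of_pos (by omega)]; push_cast; omega)]
      have hcont : g.contains (((2 * fro : Nat) : Int) + 1) = false := by
        by_contra h
        have hc : g.contains (((2 * fro : Nat) : Int) + 1) = true := by simpa using h
        have := hgb _ ((PySem.Dict.contains_iff_mem_keys g _).1 hc)
        omega
      rw [PySem.Dict.items_insert_of_not_contains g _ hcont]
      have hv : tg.getD ((fro : Int) + 1) [] = pairs.getD fro [] :=
        getD_of_items tg pairs htg hnd fro (by omega)
      have hwin : (pairs.take (m - fro)).drop fro = [pairs.getD fro []] := by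
        rw [show m - fro = fro + 1 by omega]
        rw [win_cons pairs [] fro (fro + 1) (by omega) (by omega)]
        congr 1
        apply List.drop_eq_nil_of_le
        simp
      rw [hwin, hv]
      simp [pvDrain]
    | (k' + 2), hk =>
      have hc1 : PySem.List.pyRange ((2 * fro : Nat) : Int) (m : Int) 1
          = ((2 * fro : Nat) : Int) :: (((2 * fro : Nat) : Int) + 1)
            :: PySem.List.pyRange ((2 * (fro + 1) : Nat) : Int) (m : Int) 1 := by
        rw [PySem.List.pyRange_one_cons (by push_cast; omega),
            PySem.List.pyRange_one_cons (by push_cast; omega)]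
        congr 2
      rw [hc1]
      have hmod1 : PySem.Int.mod (((2 * fro : Nat) : Int) + 1) 2 = 1 := by
        rw [PySem.Int.mod_eq_emod_of_pos (by omega)]; push_cast; omega
      have hmod2 : PySem.Int.mod ((((2 * fro : Nat) : Int) + 1) + 1) 2 = 0 := by
        rw [PySem.Int.mod_eq_emod_of_pos (by omega)]; push_cast; omega
      simp only [List.foldl_cons, hmod1, hmod2, ne_eq, one_ne_zero, not_false_eq_true, if_true,
        not_true_eq_false, if_false]
      have hv1 : tg.getD ((fro : Int) + 1) [] = pairs.getD fro [] :=
        getD_of_items tg pairs htg hnd fro (by omega)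
      have hv2 : tg.getD ((m : Int) - (fro : Int)) [] = pairs.getD (m - fro - 1) [] := by
        rw [show ((m : Int) - (fro : Int)) = ((m - fro - 1 : Nat) : Int) + 1 by push_cast [hm]; omega]
        exact getD_of_items tg pairs htg hnd (m - fro - 1) (by omega)
      have hcont1 : g.contains (((2 * fro : Nat) : Int) + 1) = false := by
        by_contra h
        have hc : g.contains (((2 * fro : Nat) : Int) + 1) = true := by simpa using h
        have := hgb _ ((PySem.Dict.contains_iff_mem_keys g _).1 hc); omega
      set g1 := g.insert (((2 * fro : Nat) : Int) + 1) (tg.getD ((fro : Int) + 1) []) with hg1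
      have hg1keys : g1.keys = g.keys ++ [((2 * fro : Nat) : Int) + 1] :=
        PySem.Dict.keys_insert_of_not_contains g _ hcont1
      have hg1b : ∀ key ∈ g1.keys, key < ((2 * fro : Nat) : Int) + 2 := by
        intro key hkey
        rw [hg1keys] at hkey
        rcases List.mem_append.1 hkey with h | h
        · have := hgb _ h; omega
        · rw [List.mem_singleton] at h; omega
      have hcont2 : g1.contains (((2 * fro : Nat) : Int) + 1 + 1) = false := by
        by_contra h
        have hc : g1.contains ((((2 * fro : Nat) : Int) + 1) + 1) = true := by simpa using h
        have := hg1b _ ((PySem.Dict.contains_iff_mem_keys g1 _).1 hc); omega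
      set g2 := g1.insert ((((2 * fro : Nat) : Int) + 1) + 1) (tg.getD ((m : Int) - (fro : Int)) []) with hg2
      have hg2keys : g2.keys = g1.keys ++ [(((2 * fro : Nat) : Int) + 1) + 1] :=
        PySem.Dict.keys_insert_of_not_contains g1 _ hcont2
      have hg2nd : g2.keys.Nodup := by
        rw [hg2keys, hg1keys, List.nodup_append]
        refine ⟨?_, List.nodup_singleton _, ?_⟩
        · rw [List.nodup_append]
          refine ⟨hgnd, List.nodup_singleton _, ?_⟩
          intro a ha b hb
          rw [List.mem_singleton] at hb; subst hb
          have := hgb _ ha; intro heq; omega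
        · intro a ha b hb
          rw [List.mem_singleton] at hb; subst hb
          rw [List.mem_append] at ha
          intro heq
          rcases ha with h | h
          · have := hgb _ h; omega
          · rw [List.mem_singleton] at h; omega
      have hg2b : ∀ key ∈ g2.keys, key < (2 * (fro + 1) : Int) + 1 := by
        intro key hkey
        rw [hg2keys] at hkey
        rcases List.mem_append.1 hkey with h | h
        · have := hg1b _ h; omega
        · rw [List.mem_singleton] at h; omega
      have hih := ihk k' (by omega) (fro + 1) g2 (by omega) hg2nd
        (by intro key hkey; have := hg2b _ hkey; push_cast at this ⊢; omega)
      have hg1items : g1.items = g.items ++ [(((2 * fro : Nat) : Int) + 1, tg.getD ((fro : Int) + 1) [])] :=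
        PySem.Dict.items_insert_of_not_contains g _ hcont1
      have hg2items : g2.items = g1.items ++ [((((2 * fro : Nat) : Int) + 1) + 1, tg.getD ((m : Int) - (fro : Int)) [])] :=
        PySem.Dict.items_insert_of_not_contains g1 _ hcont2
      have hne : (pairs.take (m - fro)).drop (fro + 1) ≠ [] := by
        have : ((pairs.take (m - fro)).drop (fro + 1)).length = k' + 1 := by simp; omega
        intro hnil; rw [hnil] at this; simp at this
      have hwin : (pairs.take (m - fro)).drop fro
          = pairs.getD fro [] :: (pairs.take (m - fro)).drop (fro + 1) :=
        win_cons pairs [] fro (m - fro) (by omega) (by omega)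
      have hlast : ((pairs.take (m - fro)).drop (fro + 1)).getLast hne = pairs.getD (m - fro - 1) [] :=
        win_last pairs [] fro (m - fro) (by omega) (by omega) hne
      have hdl : ((pairs.take (m - fro)).drop (fro + 1)).dropLast = (pairs.take (m - fro - 1)).drop (fro + 1) :=
        win_dropLast pairs fro (m - fro) (by omega)
      rw [hwin, pvDrain]
      rw [dif_neg hne]
      rw [hlast, hdl]
      rw [show m - fro - 1 = m - (fro + 1) by omega]
      push_cast at hih ⊢
      rw [hih, hg2items, hg1items, hv1, hv2]
      simp [List.append_assoc]
      constructor
      · congr 1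
        try omega
      · congr 1
        try ring

-- A's result is the front/back interleave of the forward pair list
theorem A_eq_drain (names : List String) : create_games names = pvDrain (pairsR names) 1 := by
  unfold create_games
  simp only []
  rw [phase1]
  obtain ⟨i1, i2, i3, i4⟩ := pushAll_spec (pairsR names) PySem.Dict.empty 1
    (by simp) (by simp [PySem.Dict.keys_empty])
  set tg := (pushAll PySem.Dict.empty 1 (pairsR names)).1 with htgdef
  have hitems : tg.items = pvKeyed 1 (pairsR names) := by
    rw [i1]; rfl
  have hlen : ((tg.keys.length : Nat) : Int) = (((pairsR names).length : Nat) : Int) := by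
    have : tg.keys.length = tg.items.length := by
      simp [PySem.Dict.keys]
    rw [this, hitems, pvKeyed_length]
  simp only [hlen]
  have h2 := phase2 tg (pairsR names) hitems i3 (pairsR names).length 0 PySem.Dict.empty
    (by omega) (by simp) (by simp [PySem.Dict.keys_empty])
  simp only [Nat.mul_zero, Nat.cast_zero, zero_add, Nat.sub_zero, List.drop_zero,
    List.take_length] at h2
  rw [h2]
  rfl

-- ---------- B side ----------

theorem srcIdx_lt (m q : Nat) (h : q < m) : srcIdx m q < m := by
  unfold srcIdx; split <;> omega

theorem natKey_srcIdx (m q : Nat) (h : q < m) : natKey m (srcIdx m q) - 1 = q := by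
  unfold natKey srcIdx; split <;> split <;> omega

theorem srcIdx_natKey (m t : Nat) (h : t < m) : srcIdx m (natKey m t - 1) = t := by
  unfold natKey srcIdx; split <;> split <;> omega

theorem srcIdx_shift (k q : Nat) (h : q < k) : srcIdx (k + 2) (q + 2) = srcIdx k q + 1 := by
  unfold srcIdx; split <;> split <;> omega

theorem pairsR_twolen : ∀ (l : List String), 2 * (pairsR l).length = l.length * (l.length - 1) := by
  intro l
  induction l with
  | nil => simp [pairsR]
  | cons a t ih =>
    simp only [pairsR, List.length_append, List.length_map, List.length_cons]
    rcases t with _ | ⟨b, t'⟩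
    · simp [pairsR]
    · simp only [List.length_cons] at *
      have hr : (t'.length + 1 + 1) * (t'.length + 1 + 1 - 1)
          = (t'.length + 1) * (t'.length + 1 - 1) + 2 * (t'.length + 1) := by
        simp only [Nat.add_sub_cancel]; ring
      omega

-- the generic conversion of B's nested fold into a fold over pairsR
theorem bfold_eq {S : Type} (f : S → List (String × String) → S) (suf : List String) :
    ∀ (pre : List String) (acc : S),
    (PySem.List.enumerate suf ((pre.length : Nat) : Int)).foldl
      (fun st p =>
        (PySem.List.slice (pre ++ suf) (some (p.1 + 1)) none).foldl
          (fun st b => f st (pvGame p.2 b)) st) acc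
    = (pairsR suf).foldl f acc := by
  induction suf with
  | nil => intro pre acc; simp [PySem.List.enumerate_nil, pairsR]
  | cons a t ih =>
    intro pre acc
    rw [PySem.List.enumerate_cons]
    simp only [List.foldl_cons]
    have h1 : (((pre.length : Nat) : Int) + 1) = (((pre ++ [a]).length : Nat) : Int) := by
      simp
    have hsp : pre ++ a :: t = (pre ++ [a]) ++ t := by simp
    have hdrop : PySem.List.slice (pre ++ a :: t) (some (((pre.length : Nat) : Int) + 1)) none = t := by
      rw [h1, PySem.List.slice_from_natCast, hsp]
      exact List.drop_left
    rw [hdrop]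
    have hin : t.foldl (fun st b => f st (pvGame a b)) acc
        = (t.map (pvGame a)).foldl f acc := by rw [List.foldl_map]
    rw [hin]
    have ih' := ih (pre ++ [a]) ((t.map (pvGame a)).foldl f acc)
    rw [hsp, h1, ih']
    simp only [pairsR, List.foldl_append]

-- one scatter write turns the "first t0 pairs placed" list into the "first t0+1" one
theorem mapStep (ps : List (List (String × String))) (t0 : Nat) (h : t0 < ps.length) :
    ((List.range ps.length).map
        (fun q => if srcIdx ps.length q < t0 then ps.getD (srcIdx ps.length q) [] else [])).set
      (natKey ps.length t0 - 1) (ps.getD t0 [])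
    = (List.range ps.length).map
        (fun q => if srcIdx ps.length q < t0 + 1 then ps.getD (srcIdx ps.length q) [] else []) := by
  apply List.ext_getElem
  · simp
  · intro i hi1 hi2
    simp only [List.length_map, List.length_range] at hi2
    rw [List.getElem_set]
    simp only [List.getElem_map, List.getElem_range]
    by_cases hq : natKey ps.length t0 - 1 = i
    · subst hq
      rw [if_pos rfl, srcIdx_natKey ps.length t0 h, if_pos (by omega)]
    · rw [if_neg hq]
      have hne : srcIdx ps.length i ≠ t0 := by
        intro heq
        exact hq (by rw [← heq] at *; exact natKey_srcIdx ps.length i hi2)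
      by_cases hlt : srcIdx ps.length i < t0
      · rw [if_pos hlt, if_pos (by omega)]
      · rw [if_neg hlt, if_neg (by omega)]

-- the scatter loop, from the state "first t0 pairs placed", fills every slot
theorem scatter (ps : List (List (String × String))) :
    ∀ (suf : List (List (String × String))) (t0 : Nat), ps.drop t0 = suf →
    (suf.foldl
      (fun (st : List (List (String × String)) × Int) g =>
        (PySem.List.pySetD st.1
          ((if 2 * st.2 + 1 ≤ ((ps.length : Nat) : Int) then 2 * st.2 + 1
            else 2 * (((ps.length : Nat) : Int) - st.2)) - 1) g,
         st.2 + 1))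
      ((List.range ps.length).map
          (fun q => if srcIdx ps.length q < t0 then ps.getD (srcIdx ps.length q) [] else []),
       ((t0 : Nat) : Int))).1
    = (List.range ps.length).map (fun q => ps.getD (srcIdx ps.length q) []) := by
  intro suf
  induction suf with
  | nil =>
    intro t0 h
    have hle : ps.length ≤ t0 := by
      have := congrArg List.length h
      simp only [List.length_drop, List.length_nil] at this
      omega
    simp only [List.foldl_nil]
    refine List.map_congr_left ?_
    intro q hq
    rw [List.mem_range] at hq
    rw [if_pos (lt_of_lt_of_le (srcIdx_lt ps.length q hq) hle)]
  | cons g rest ih =>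
    intro t0 h
    have ht0 : t0 < ps.length := by
      have := congrArg List.length h
      simp only [List.length_drop, List.length_cons] at this
      omega
    have hcons := List.drop_eq_getElem_cons (l := ps) ht0
    rw [h] at hcons
    have hg : ps.getD t0 [] = g := by
      rw [List.getD_eq_getElem ps [] ht0]
      exact (List.cons.injEq _ _ _ _ ▸ hcons).1.symm
    have hrest : ps.drop (t0 + 1) = rest := ((List.cons.injEq _ _ _ _ ▸ hcons).2).symm
    simp only [List.foldl_cons]
    have hk : (if 2 * ((t0 : Nat) : Int) + 1 ≤ ((ps.length : Nat) : Int)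
          then 2 * ((t0 : Nat) : Int) + 1
          else 2 * (((ps.length : Nat) : Int) - ((t0 : Nat) : Int))) - 1
        = ((natKey ps.length t0 - 1 : Nat) : Int) := by
      unfold natKey; split_ifs <;> push_cast <;> omega
    rw [hk, PySem.List.pySetD_natCast]
    rw [← hg, mapStep ps t0 ht0]
    have := ih (t0 + 1) hrest
    rw [show ((t0 : Nat) : Int) + 1 = (((t0 + 1 : Nat)) : Int) by push_cast; ring]
    exact this

theorem enum_map_range {α : Type} (f : Nat → α) :
    ∀ (m : Nat) (s : Int), PySem.List.enumerate ((List.range m).map f) s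
      = (List.range m).map (fun (q : Nat) => (s + (q : Int), f q)) := by
  intro m
  induction m with
  | zero => intro s; simp [PySem.List.enumerate_nil]
  | succ k ih =>
    intro s
    rw [List.range_succ, List.map_append, List.map_append,
        PySem.List.enumerate_append, ih]
    simp [PySem.List.enumerate_cons, PySem.List.enumerate_nil]

theorem range_add_two (k : Nat) :
    List.range (k + 2) = 0 :: 1 :: (List.range k).map (fun q => q + 2) := by
  rw [List.range_succ_eq_map, List.range_succ_eq_map]
  simp only [List.map_cons, List.map_map]
  refine congrArg _ (congrArg _ (List.map_congr_left ?_))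
  intro a _
  simp [Function.comp]

-- the interleave is the map by srcIdx
theorem pvDrain_eq : ∀ (n : Nat) (ps : List (List (String × String))) (c : Int),
    ps.length = n →
    pvDrain ps c = (List.range ps.length).map
      (fun (q : Nat) => (c + (q : Int), ps.getD (srcIdx ps.length q) [])) := by
  intro n
  induction n using Nat.strong_induction_on with
  | _ n ihn =>
    intro ps c hn
    match ps with
    | [] => simp [pvDrain]
    | [x] =>
      simp only [pvDrain]
      simp [srcIdx]
    | x :: y :: rest' =>
      have hne : (y :: rest') ≠ ([] : List (List (String × String))) := by simp
      rw [pvDrain, dif_neg hne]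
      set rest := y :: rest' with hrest
      set mid := rest.dropLast with hmid
      have hmlen : mid.length = rest.length - 1 := by simp [hmid]
      have hrlen : 1 ≤ rest.length := by rw [hrest]; simp
      have hlen : (x :: rest).length = mid.length + 2 := by
        simp only [List.length_cons]; omega
      have hmidval : ∀ i, i < mid.length → (x :: rest).getD (i + 1) [] = mid.getD i [] := by
        intro i hi
        have hi' : i < rest.length := by omega
        rw [List.getD_cons_succ]
        rw [List.getD_eq_getElem rest [] hi', List.getD_eq_getElem mid [] hi]
        simp [hmid, List.getElem_dropLast]
      have hlast : rest.getLast hne = (x :: rest).getD (mid.length + 1) [] := by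
        rw [List.getD_cons_succ, hmlen, List.getLast_eq_getElem,
            List.getD_eq_getElem rest [] (by omega)]
      have hih := ihn mid.length (by have := hn; simp only [List.length_cons] at this; omega)
        mid (c + 2) rfl
      rw [hih]
      rw [hlen, range_add_two, List.map_cons, List.map_cons, List.map_map]
      have h0 : srcIdx (mid.length + 2) 0 = 0 := by simp [srcIdx]
      have h1 : srcIdx (mid.length + 2) 1 = mid.length + 1 := by simp [srcIdx]
      rw [h0, h1]
      rw [← hlast]
      simp only [Nat.cast_zero, add_zero, Nat.cast_one, List.getD_cons_zero]
      refine congrArg _ (congrArg _ ?_)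
      refine List.map_congr_left ?_
      intro q hq
      rw [List.mem_range] at hq
      simp only [Function.comp]
      rw [srcIdx_shift mid.length q hq,
          hmidval (srcIdx mid.length q) (srcIdx_lt mid.length q hq)]
      congr 1
      push_cast
      ring

theorem B_eq_map (names : List String) :
    create_games_alt names = (List.range (pairsR names).length).map
      (fun (q : Nat) => ((1 : Int) + (q : Int), (pairsR names).getD (srcIdx (pairsR names).length q) [])) := by
  have h2l := pairsR_twolen names
  have hm : PySem.Int.floordiv (((names.length : Nat) : Int) * (((names.length : Nat) : Int) - 1)) 2
      = (((pairsR names).length : Nat) : Int) := by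
    have hprod : ((names.length : Nat) : Int) * (((names.length : Nat) : Int) - 1)
        = (((2 * (pairsR names).length) : Nat) : Int) := by
      rcases Nat.eq_zero_or_pos names.length with h0 | hpos
      · have hL : (pairsR names).length = 0 := by rw [h0] at h2l; omega
        rw [h0, hL]; norm_num
      · have he : names.length * (names.length - 1) = 2 * (pairsR names).length := h2l.symm
        rw [← he]
        push_cast [Nat.cast_sub hpos]
        ring
    rw [hprod]
    calc PySem.Int.floordiv (((2 * (pairsR names).length : Nat)) : Int) 2
        = (((2 * (pairsR names).length) / 2 : Nat) : Int) := by
          exact_mod_cast PySem.Int.floordiv_natCast (2 * (pairsR names).length) 2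
      _ = (((pairsR names).length : Nat) : Int) := by congr 1; omega
  unfold create_games_alt
  simp only []
  rw [hm, Int.toNat_natCast]
  have hb := bfold_eq
    (fun (st : List (List (String × String)) × Int) g =>
      (PySem.List.pySetD st.1
        ((if 2 * st.2 + 1 ≤ (((pairsR names).length : Nat) : Int) then 2 * st.2 + 1
          else 2 * ((((pairsR names).length : Nat) : Int) - st.2)) - 1) g, st.2 + 1))
    names []
    (List.replicate (pairsR names).length ([] : List (String × String)), 0)
  simp only [List.nil_append, List.length_nil, Nat.cast_zero] at hb
  rw [hb]
  have hinit : (List.range (pairsR names).length).map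
      (fun q => if srcIdx (pairsR names).length q < 0
        then (pairsR names).getD (srcIdx (pairsR names).length q) [] else [])
      = List.replicate (pairsR names).length ([] : List (String × String)) := by
    simp [List.map_const']
  rw [← hinit]
  have hs := scatter (pairsR names) (pairsR names) 0 (by simp)
  simp only [Nat.cast_zero] at hs
  rw [hs]
  rw [enum_map_range]

-- ===== VERDICT (by name: the statement is the Claim_ definition above) =====
theorem create_games_spec : Claim_equal_create_games := by
  unfold Claim_equal_create_games
  intro names _
  unfold Spec_create_games
  rw [A_eq_drain, B_eq_map, pvDrain_eq (pairsR names).length (pairsR names) 1 rfl]
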